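-- pv_equiv track=rewrite | github.com/a-a-k/DeathStarBench-CI | socialNetwork/resilience-demo/simulate.py | _derive_entrypoints
-- ===== SOURCE A (Python) =====
-- from typing import Dict, Iterable, List, Mapping, MutableMapping, Optional
--
-- def _derive_entrypoints(dependencies: Iterable[Mapping[str, str]]) -> Dict[str, List[str]]:
--     """Fallback entrypoints when the graph does not provide them explicitly."""
--     # The fallback chooses every unique parent as a pseudo-endpoint so the demo
--     # continues to operate even if a minimal Jaeger dump is provided.
--     entrypoints: Dict[str, List[str]] = {}
--     for dep in dependencies:
--         parent = dep.get("parent")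
--         child = dep.get("child")
--         if not parent or not child:
--             continue
--         endpoint_key = f"/{parent}"
--         entrypoints.setdefault(endpoint_key, [])
--         if parent not in entrypoints[endpoint_key]:
--             entrypoints[endpoint_key].append(parent)
--         if child not in entrypoints[endpoint_key]:
--             entrypoints[endpoint_key].append(child)
--     return entrypoints
-- ===== SOURCE B (Python) =====
-- from typing import Dict, Iterable, List, Mapping
--
-- def _derive_entrypoints(dependencies: Iterable[Mapping[str, str]]) -> Dict[str, List[str]]:
--     """Fallback entrypoints when the graph does not provide them explicitly."""
--     # Flatten every valid dependency into (endpoint_key, name) pairs.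
--     pairs = [("/" + dep.get("parent"), name)
--              for dep in dependencies
--              if dep.get("parent") and dep.get("child")
--              for name in (dep.get("parent"), dep.get("child"))]
--     # Group by endpoint key (first-occurrence order), deduplicating the names
--     # of each group while keeping their first-occurrence order.
--     keys = dict.fromkeys(k for k, _ in pairs)
--     return {k: list(dict.fromkeys(n for k2, n in pairs if k2 == k)) for k in keys}
-- ===== Notes on version B (the rewrite author's own statement) =====
-- stated objective: alternative
-- what changed: Instead of A's single stateful dict loop with in-loop membership-scan dedup, B flattens the valid dependencies into a list of (endpoint_key, name) pairs and then builds the result declaratively: unique keys in first-occurrence order, each mapped to the ordered dedup of the names filtered for that key.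
import Mathlib
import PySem

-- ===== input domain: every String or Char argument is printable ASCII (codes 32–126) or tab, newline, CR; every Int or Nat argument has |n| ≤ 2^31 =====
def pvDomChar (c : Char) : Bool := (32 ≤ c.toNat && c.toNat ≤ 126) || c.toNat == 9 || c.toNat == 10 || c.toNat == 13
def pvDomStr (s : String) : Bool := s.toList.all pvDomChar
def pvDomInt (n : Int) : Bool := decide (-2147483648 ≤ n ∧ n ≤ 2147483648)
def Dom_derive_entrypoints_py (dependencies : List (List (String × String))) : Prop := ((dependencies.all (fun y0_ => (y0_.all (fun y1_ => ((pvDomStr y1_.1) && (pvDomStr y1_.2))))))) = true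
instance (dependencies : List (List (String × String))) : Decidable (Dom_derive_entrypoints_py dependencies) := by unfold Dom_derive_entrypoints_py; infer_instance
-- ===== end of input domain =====

-- B replaces A's single stateful dict loop (membership-scan dedup per dep) by a
-- flatten-then-group decomposition: a list of (key, name) pairs, then unique
-- keys mapped to the ordered dedup of their filtered names — an alternative of
-- similar cost, not claimed faster.


-- ===== PORT A =====
-- one loop iteration of A: guarded membership-dedup append of parent then child
def pvStepA (entrypoints : PySem.Dict String (List String)) (dep : List (String × String)) : PySem.Dict String (List String) :=
  let parent := (PySem.Dict.mk dep).get? "parent"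
  let child := (PySem.Dict.mk dep).get? "child"
  match parent, child with
  | some p, some c =>
    if p = "" || c = "" then entrypoints
    else
      let endpoint_key := "/" ++ p
      let e1 := entrypoints.setdefault endpoint_key []
      let cur := e1.getD endpoint_key []
      let cur1 := if p ∈ cur then cur else cur ++ [p]
      let cur2 := if c ∈ cur1 then cur1 else cur1 ++ [c]
      e1.insert endpoint_key cur2
  | _, _ => entrypoints

def derive_entrypoints_py (dependencies : List (List (String × String))) : List (String × List String) :=
  (dependencies.foldl pvStepA PySem.Dict.empty).items

-- ===== PORT B =====
-- the flattening comprehension: every valid dep yields (key, parent), (key, child)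
def pvPairs (dependencies : List (List (String × String))) : List (String × String) :=
  dependencies.flatMap (fun dep =>
    match (PySem.Dict.mk dep).get? "parent", (PySem.Dict.mk dep).get? "child" with
    | some p, some c => if p = "" || c = "" then [] else [("/" ++ p, p), ("/" ++ p, c)]
    | _, _ => [])

def derive_entrypoints_py_alt (dependencies : List (List (String × String))) : List (String × List String) :=
  let pairs := pvPairs dependencies
  (PySem.List.dedup (pairs.map Prod.fst)).map
    (fun k => (k, PySem.List.dedup ((pairs.filter (fun q => q.1 == k)).map Prod.snd)))

-- ===== PRECONDITION & SPEC =====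
def Spec_derive_entrypoints_py (dependencies : List (List (String × String))) (out : List (String × List String)) : Prop := out = derive_entrypoints_py_alt dependencies
instance (dependencies : List (List (String × String))) (out : List (String × List String)) : Decidable (Spec_derive_entrypoints_py dependencies out) := by unfold Spec_derive_entrypoints_py; infer_instance

-- ===== CLAIM (what is proved, stated in full; the proofs are below) =====
def Claim_equal_derive_entrypoints_py : Prop := ∀ (dependencies : List (List (String × String))), Dom_derive_entrypoints_py dependencies → Spec_derive_entrypoints_py dependencies (derive_entrypoints_py dependencies)

-- ===== LEMMAS AND PROOFS =====

-- proof-side grouping loop: fold a (key, name) pair into the raw-groups dict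
def pvModStep (d : PySem.Dict String (List String)) (q : String × String) : PySem.Dict String (List String) :=
  d.modify q.1 [] (· ++ [q.2])

-- the dedup of each value list, applied to a whole dict
def pvDedupPair (kv : String × List String) : String × List String :=
  (kv.1, PySem.List.dedup kv.2)

def pvMapDedup (d : PySem.Dict String (List String)) : PySem.Dict String (List String) :=
  PySem.Dict.mk (d.items.map pvDedupPair)

-- setdefault k [] followed by an overwriting insert at k is just the insert
theorem pv_setdefault_insert (d : PySem.Dict String (List String)) (k : String) (v : List String) :
    (d.setdefault k []).insert k v = d.insert k v := by
  by_cases h : d.contains k = true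
  · rw [PySem.Dict.setdefault_of_contains d [] h]
  · rw [PySem.Dict.setdefault_of_not_contains d [] (by simpa using h),
        PySem.Dict.insert_insert_self]

theorem pv_get?_mapDedup (l : List (String × List String)) (k : String) :
    (PySem.Dict.mk (l.map pvDedupPair)).get? k
      = ((PySem.Dict.mk l).get? k).map PySem.List.dedup := by
  induction l with
  | nil => rfl
  | cons kv rest ih =>
    cases kv with
    | mk a b =>
      simp only [List.map_cons, pvDedupPair, PySem.Dict.get?_mk_cons]
      by_cases h : (a == k) = true
      · simp [h]
      · simp [h, ih]

theorem pv_getD_mapDedup (d : PySem.Dict String (List String)) (k : String) :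
    (pvMapDedup d).getD k [] = PySem.List.dedup (d.getD k []) := by
  rw [PySem.Dict.getD_eq_get?_getD, PySem.Dict.getD_eq_get?_getD]
  have h : (pvMapDedup d).get? k = (d.get? k).map PySem.List.dedup := by
    cases d with
    | mk l => exact pv_get?_mapDedup l k
  rw [h]
  cases d.get? k <;> rfl

theorem pv_contains_mapDedup (d : PySem.Dict String (List String)) (k : String) :
    (pvMapDedup d).contains k = d.contains k := by
  rw [PySem.Dict.contains_eq_isSome_get?, PySem.Dict.contains_eq_isSome_get?]
  have h : (pvMapDedup d).get? k = (d.get? k).map PySem.List.dedup := by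
    cases d with
    | mk l => exact pv_get?_mapDedup l k
  rw [h]
  cases d.get? k <;> rfl

theorem pv_mapDedup_insert (d : PySem.Dict String (List String)) (k : String) (v : List String) :
    pvMapDedup (d.insert k v) = (pvMapDedup d).insert k (PySem.List.dedup v) := by
  apply PySem.Dict.ext
  by_cases h : d.contains k = true
  · have h' : (pvMapDedup d).contains k = true := by rw [pv_contains_mapDedup]; exact h
    show (d.insert k v).items.map pvDedupPair = _
    rw [PySem.Dict.items_insert_of_contains d v h,
        PySem.Dict.items_insert_of_contains (pvMapDedup d) (PySem.List.dedup v) h']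
    show _ = ((d.items.map pvDedupPair).map _)
    rw [List.map_map, List.map_map]
    apply List.map_congr_left
    intro p _
    by_cases hp : (p.1 == k) = true
    · simp [Function.comp, hp, pvDedupPair]
    · simp [Function.comp, hp, pvDedupPair]
  · have h0 : d.contains k = false := by simpa using h
    have h' : (pvMapDedup d).contains k = false := by rw [pv_contains_mapDedup]; exact h0
    show (d.insert k v).items.map pvDedupPair = _
    rw [PySem.Dict.items_insert_of_not_contains d v h0,
        PySem.Dict.items_insert_of_not_contains (pvMapDedup d) (PySem.List.dedup v) h']
    show (d.items ++ [(k, v)]).map pvDedupPair = d.items.map pvDedupPair ++ [(k, PySem.List.dedup v)]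
    rw [List.map_append]
    rfl

-- the dedup of a group extended by [p, c] is A's two conditional appends
theorem pv_dedup_extend (x : List String) (p c : String) :
    PySem.List.dedup (x ++ [p, c])
      = (let cur := PySem.List.dedup x
         let cur1 := if p ∈ cur then cur else cur ++ [p]
         if c ∈ cur1 then cur1 else cur1 ++ [c]) := by
  have hx : x ++ [p, c] = (x ++ [p]) ++ [c] := by simp
  rw [hx, PySem.List.dedup_eq_ofList, PySem.Set.ofList_append_singleton,
      PySem.Set.ofList_append_singleton, PySem.Set.add_eq_ite, PySem.Set.add_eq_ite,
      PySem.List.dedup_eq_ofList]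

-- the two modifies a valid dep contributes, written as one overwriting insert
theorem pv_mod_pair (R : PySem.Dict String (List String)) (k p c : String) :
    pvModStep (pvModStep R (k, p)) (k, c) = R.insert k (R.getD k [] ++ [p, c]) := by
  show (R.insert k (R.getD k [] ++ [p])).insert k
        ((R.insert k (R.getD k [] ++ [p])).getD k [] ++ [c]) = _
  rw [PySem.Dict.insert_insert_self, PySem.Dict.getD_insert_self]
  simp

-- one dep of A's loop, acting on the dedup image, is the raw grouping of the
-- dep's flattened pairs followed by the dedup image
theorem pv_step_comm (R : PySem.Dict String (List String)) (dep : List (String × String)) :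
    pvStepA (pvMapDedup R) dep
      = pvMapDedup ((match (PySem.Dict.mk dep).get? "parent", (PySem.Dict.mk dep).get? "child" with
          | some p, some c => if p = "" || c = "" then ([] : List (String × String))
                              else [("/" ++ p, p), ("/" ++ p, c)]
          | _, _ => []).foldl pvModStep R) := by
  unfold pvStepA
  cases hp : (PySem.Dict.mk dep).get? "parent" with
  | none => cases (PySem.Dict.mk dep).get? "child" <;> rfl
  | some p =>
    cases hc : (PySem.Dict.mk dep).get? "child" with
    | none => rfl
    | some c =>
      simp only []
      by_cases hg : (p = "" || c = "") = true
      · simp [hg]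
      · have hg' : (p = "" || c = "") = false := by simpa using hg
        simp only [hg', Bool.false_eq_true, if_false, List.foldl_cons, List.foldl_nil]
        rw [pv_mod_pair, pv_setdefault_insert,
            PySem.Dict.getD_setdefault_self,
            pv_mapDedup_insert, pv_dedup_extend, pv_getD_mapDedup]

-- A's whole loop is the pair-by-pair raw grouping of the flattened pairs,
-- followed by the per-group dedup
theorem pv_loop (deps : List (List (String × String))) :
    ∀ R : PySem.Dict String (List String),
      deps.foldl pvStepA (pvMapDedup R) = pvMapDedup ((pvPairs deps).foldl pvModStep R) := by
  induction deps with
  | nil => intro R; rfl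
  | cons dep rest ih =>
    intro R
    simp only [List.foldl_cons, pv_step_comm R dep, pvPairs, List.flatMap_cons,
      List.foldl_append]
    exact ih _

-- ===== VERDICT (by name: the statement is the Claim_ definition above) =====
theorem derive_entrypoints_py_spec : Claim_equal_derive_entrypoints_py := by
  intro deps _
  unfold Spec_derive_entrypoints_py derive_entrypoints_py derive_entrypoints_py_alt
  have h := pv_loop deps PySem.Dict.empty
  have he : pvMapDedup PySem.Dict.empty = PySem.Dict.empty := rfl
  rw [he] at h
  rw [h]
  -- the raw grouping dict, described by its keys and lookups
  set D := (pvPairs deps).foldl pvModStep PySem.Dict.empty with hD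
  have hnd : D.keys.Nodup := by
    have := PySem.Dict.nodup_keys_foldl_modify_key (pvPairs deps) Prod.fst []
      (fun _ q => (· ++ [q.2])) PySem.Dict.empty (by simp [pysem])
    simpa [pvModStep] using this
  have hkeys : D.keys = PySem.List.dedup ((pvPairs deps).map Prod.fst) := by
    have := PySem.Dict.keys_foldl_modify_key (pvPairs deps) Prod.fst []
      (fun _ q => (· ++ [q.2])) PySem.Dict.empty
    simpa [pvModStep, PySem.Set.update_nil_left, PySem.List.dedup_eq_ofList] using this
  have hget : ∀ k, D.getD k [] = ((pvPairs deps).filter (fun q => q.1 == k)).map Prod.snd := by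
    intro k
    have := PySem.Dict.getD_foldl_modify_append (pvPairs deps) PySem.Dict.empty k
    simpa [pvModStep] using this
  have hitems : D.items = D.keys.map (fun k => (k, D.getD k [])) :=
    PySem.Dict.items_eq_map_keys D hnd []
  show (pvMapDedup D).items = _
  have : (pvMapDedup D).items = D.items.map pvDedupPair := rfl
  rw [this, hitems, hkeys, List.map_map]
  apply List.map_congr_left
  intro k _
  simp [Function.comp, pvDedupPair, hget]
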